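-- pv_equiv track=rewrite | github.com/paulklemstine/factor | lean/demo/Pythagorean/higher_dim_factoring_demo.py | factor_via_5tuples
-- ===== SOURCE A (Python) =====
-- from math import gcd, isqrt, sqrt
-- from collections import defaultdict
--
-- def find_5tuples(d_max=30):
--     """Find all Pythagorean 5-tuples a₁²+a₂²+a₃²+a₄²=a₅² with a₅ ≤ d_max."""
--     tuples = []
--     for d in range(1, d_max + 1):
--         d2 = d * d
--         for a1 in range(0, d):
--             for a2 in range(a1, d):
--                 for a3 in range(a2, d):
--                     rem = d2 - a1 * a1 - a2 * a2 - a3 * a3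
--                     if rem < 0:
--                         break
--                     a4 = isqrt(rem)
--                     if a4 >= a3 and a4 * a4 == rem:
--                         tuples.append((a1, a2, a3, a4, d))
--     return tuples
--
-- def gcd_channels_5tuple(a1, a2, a3, a4, a5, N):
--     """Extract factor candidates from a 5-tuple for target N."""
--     candidates = set()
--     components = [a1, a2, a3, a4]
--     for comp in components:
--         g1 = gcd(a5 - comp, N)
--         g2 = gcd(a5 + comp, N)
--         if 1 < g1 < N: candidates.add(g1)
--         if 1 < g2 < N: candidates.add(g2)
--     return candidates
--
-- def cross_collision_5tuple(t1, t2, N):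
--     """Extract factors from cross-differences of two 5-tuples with shared hypotenuse."""
--     candidates = set()
--     for i in range(4):
--         for j in range(4):
--             diff = abs(t1[i] * t1[i] - t2[j] * t2[j])
--             if diff > 0:
--                 g = gcd(diff, N)
--                 if 1 < g < N:
--                     candidates.add(g)
--     return candidates
--
-- def factor_via_5tuples(N, d_max=40):
--     """Factor N using the 5-tuple pipeline."""
--     factors = set()
--     tuples5 = find_5tuples(d_max)
--
--     # Group by hypotenuse for cross-collision
--     by_hyp = defaultdict(list)
--     for t in tuples5:
--         by_hyp[t[4]].append(t)
--         new_factors = gcd_channels_5tuple(*t, N)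
--         factors.update(new_factors)
--
--     # Cross-collision analysis
--     for hyp, group in by_hyp.items():
--         for i in range(len(group)):
--             for j in range(i + 1, len(group)):
--                 cross_factors = cross_collision_5tuple(group[i], group[j], N)
--                 factors.update(cross_factors)
--
--     return {f for f in factors if 1 < f < N and N % f == 0}
-- ===== SOURCE B (Python) =====
-- from math import gcd, isqrt
-- from itertools import combinations
--
-- def find_5tuples(d_max=30):
--     """Find all Pythagorean 5-tuples a1^2+a2^2+a3^2+a4^2=a5^2 with a5 <= d_max."""
--     tuples = []
--     for d in range(1, d_max + 1):
--         d2 = d * d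
--         for a1 in range(0, d):
--             for a2 in range(a1, d):
--                 for a3 in range(a2, d):
--                     rem = d2 - a1 * a1 - a2 * a2 - a3 * a3
--                     if rem < 0:
--                         break
--                     a4 = isqrt(rem)
--                     if a4 >= a3 and a4 * a4 == rem:
--                         tuples.append((a1, a2, a3, a4, d))
--     return tuples
--
-- def factor_via_5tuples(N, d_max=40):
--     """Factor N using the 5-tuple pipeline (flat scan, no grouping dict)."""
--     tuples5 = find_5tuples(d_max)
--     factors = set()
--
--     # gcd channels, one pass over all tuples
--     for a1, a2, a3, a4, a5 in tuples5:
--         for comp in (a1, a2, a3, a4):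
--             for s in (a5 - comp, a5 + comp):
--                 g = gcd(s, N)
--                 if 1 < g < N:
--                     factors.add(g)
--
--     # cross-collision over all unordered pairs, guarded by a shared hypotenuse
--     for t1, t2 in combinations(tuples5, 2):
--         if t1[4] == t2[4]:
--             for x in t1[:4]:
--                 for y in t2[:4]:
--                     diff = abs(x * x - y * y)
--                     if diff > 0:
--                         g = gcd(diff, N)
--                         if 1 < g < N:
--                             factors.add(g)
--
--     return {f for f in factors if 1 < f < N and N % f == 0}
-- ===== Notes on version B (the rewrite author's own statement) =====
-- stated objective: alternative
-- what changed: B drops A's by-hypotenuse grouping dictionary entirely: it accumulates gcd-channel factors in one flat pass over the tuple list and then runs the cross-collision over all unordered pairs of tuples (itertools.combinations) guarded by an equal-hypotenuse test, instead of building an index and iterating group by group; per-tuple/per-pair candidate sets are also dropped in favour of adding factors directly.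
import Mathlib
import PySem

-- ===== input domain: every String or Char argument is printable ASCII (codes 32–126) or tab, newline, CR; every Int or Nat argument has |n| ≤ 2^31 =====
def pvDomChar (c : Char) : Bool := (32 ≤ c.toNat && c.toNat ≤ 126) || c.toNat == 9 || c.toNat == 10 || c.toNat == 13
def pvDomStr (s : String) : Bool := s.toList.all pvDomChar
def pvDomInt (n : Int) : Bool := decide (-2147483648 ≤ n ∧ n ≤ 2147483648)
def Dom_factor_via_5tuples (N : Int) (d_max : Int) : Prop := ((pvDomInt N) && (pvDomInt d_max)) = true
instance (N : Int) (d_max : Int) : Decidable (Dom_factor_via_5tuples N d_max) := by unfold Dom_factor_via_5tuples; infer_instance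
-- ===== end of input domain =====

-- B replaces A's hypotenuse-grouping dictionary by one flat scan over all unordered
-- tuple pairs guarded by an equal-hypotenuse test (objective: alternative decomposition).

abbrev pvTup : Type := Int × Int × Int × Int × Int

-- default tuple for the total indexing form pyGetD (indices are always in range here)
def pvTupD : pvTup := (0, 0, 0, 0, 0)

-- shared helper of both Pythons: find_5tuples (identical source in Source A and Source B)
-- math.isqrt rem (rem ≥ 0 at every call site, guarded by the `rem < 0` break) = Nat.sqrt, exact
def pvIsqrt (n : Int) : Int := (Nat.sqrt n.toNat : Int)

-- innermost a3-loop of find_5tuples, with Python's `break` as early return of the accumulator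
def pvFindA3 (d2 a1 a2 d : Int) : List Int → List pvTup → List pvTup
  | [], acc => acc
  | a3 :: rest, acc =>
      let rem := d2 - a1 * a1 - a2 * a2 - a3 * a3
      if rem < 0 then acc
      else
        let a4 := pvIsqrt rem
        let acc := if a4 ≥ a3 ∧ a4 * a4 = rem then acc ++ [(a1, a2, a3, a4, d)] else acc
        pvFindA3 d2 a1 a2 d rest acc

def pvFind5 (d_max : Int) : List pvTup :=
  (PySem.List.pyRange 1 (d_max + 1) 1).foldl (fun acc d =>
    let d2 := d * d
    (PySem.List.pyRange 0 d 1).foldl (fun acc a1 =>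
      (PySem.List.pyRange a1 d 1).foldl (fun acc a2 =>
        pvFindA3 d2 a1 a2 d (PySem.List.pyRange a2 d 1) acc) acc) acc) []

-- ===== PORT A =====
-- math.gcd(x, N) (nonnegative gcd of absolute values) = (Int.gcd x N : Int), exact
def gcd_channels_5tuple (a1 a2 a3 a4 a5 N : Int) : PySem.Set Int :=
  [a1, a2, a3, a4].foldl (fun cand comp =>
    let g1 : Int := ((a5 - comp).gcd N : Int)
    let g2 : Int := ((a5 + comp).gcd N : Int)
    let cand := if 1 < g1 ∧ g1 < N then PySem.Set.add cand g1 else cand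
    if 1 < g2 ∧ g2 < N then PySem.Set.add cand g2 else cand) PySem.Set.empty

-- `for i in range(4): t1[i]` over a fixed 5-tuple = iteration over its first four components
def pvComps (t : pvTup) : List Int := [t.1, t.2.1, t.2.2.1, t.2.2.2.1]

def cross_collision_5tuple (t1 t2 : pvTup) (N : Int) : PySem.Set Int :=
  (pvComps t1).foldl (fun cand x =>
    (pvComps t2).foldl (fun cand y =>
      let diff := |x * x - y * y|
      if 0 < diff then
        let g : Int := (diff.gcd N : Int)
        if 1 < g ∧ g < N then PySem.Set.add cand g else cand
      else cand) cand) PySem.Set.empty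

-- the two nested index loops of A's cross-collision pass over one group
def pvGroupLoop (N : Int) (c : List pvTup) (fs : PySem.Set Int) : PySem.Set Int :=
  (PySem.List.pyRange 0 (PySem.List.len c) 1).foldl (fun fs i =>
    (PySem.List.pyRange (i + 1) (PySem.List.len c) 1).foldl (fun fs j =>
      PySem.Set.update fs
        (cross_collision_5tuple (PySem.List.pyGetD c i pvTupD) (PySem.List.pyGetD c j pvTupD) N)) fs) fs

def factor_via_5tuples (N : Int) (d_max : Int) : List Int :=
  let tuples5 := pvFind5 d_max
  -- one loop, two accumulators: the defaultdict by_hyp (by_hyp[t[4]].append(t) = modify) and factors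
  let st := tuples5.foldl
    (fun (st : PySem.Dict Int (List pvTup) × PySem.Set Int) t =>
      (st.1.modify t.2.2.2.2 [] (· ++ [t]),
       PySem.Set.update st.2 (gcd_channels_5tuple t.1 t.2.1 t.2.2.1 t.2.2.2.1 t.2.2.2.2 N)))
    (PySem.Dict.empty, PySem.Set.empty)
  let factors := st.1.items.foldl (fun factors kg => pvGroupLoop N kg.2 factors) st.2
  factors.filter (fun f => decide (1 < f) && decide (f < N) && (PySem.Int.mod N f == 0))

-- ===== PORT B =====
def pvGcdAdd (fs : PySem.Set Int) (t : pvTup) (N : Int) : PySem.Set Int :=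
  [t.1, t.2.1, t.2.2.1, t.2.2.2.1].foldl (fun fs comp =>
    [t.2.2.2.2 - comp, t.2.2.2.2 + comp].foldl (fun fs s =>
      let g : Int := (s.gcd N : Int)
      if 1 < g ∧ g < N then PySem.Set.add fs g else fs) fs) fs

def pvCrossAdd (fs : PySem.Set Int) (t1 t2 : pvTup) (N : Int) : PySem.Set Int :=
  (pvComps t1).foldl (fun fs x =>
    (pvComps t2).foldl (fun fs y =>
      let diff := |x * x - y * y|
      if 0 < diff then
        let g : Int := (diff.gcd N : Int)
        if 1 < g ∧ g < N then PySem.Set.add fs g else fs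
      else fs) fs) fs

-- `for t1, t2 in combinations(tuples5, 2): if t1[4] == t2[4]: …`
def pvCombLoop (N : Int) : List pvTup → PySem.Set Int → PySem.Set Int
  | [], fs => fs
  | t1 :: rest, fs =>
      pvCombLoop N rest
        (rest.foldl (fun fs t2 =>
          if t1.2.2.2.2 == t2.2.2.2.2 then pvCrossAdd fs t1 t2 N else fs) fs)

def factor_via_5tuples_alt (N : Int) (d_max : Int) : List Int :=
  let tuples5 := pvFind5 d_max
  let factors := tuples5.foldl (fun fs t => pvGcdAdd fs t N) PySem.Set.empty
  let factors := pvCombLoop N tuples5 factors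
  factors.filter (fun f => decide (1 < f) && decide (f < N) && (PySem.Int.mod N f == 0))

-- ===== PRECONDITION & SPEC =====
def Spec_factor_via_5tuples (N : Int) (d_max : Int) (out : List Int) : Prop := out = factor_via_5tuples_alt N d_max
instance (N : Int) (d_max : Int) (out : List Int) : Decidable (Spec_factor_via_5tuples N d_max out) := by unfold Spec_factor_via_5tuples; infer_instance

-- ===== CLAIM (what is proved, stated in full; the proofs are below) =====
def Claim_equal_factor_via_5tuples : Prop := ∀ (N : Int) (d_max : Int), Dom_factor_via_5tuples N d_max → Spec_factor_via_5tuples N d_max (factor_via_5tuples N d_max)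

-- ===== LEMMAS AND PROOFS =====

def pvKey (t : pvTup) : Int := t.2.2.2.2

-- structural pair recursion that pvCombLoop performs inside one constant-key chunk
def pvPairRec (N : Int) : List pvTup → PySem.Set Int → PySem.Set Int
  | [], fs => fs
  | t :: r, fs => pvPairRec N r (r.foldl (fun fs t2 => pvCrossAdd fs t t2 N) fs)

-- generic pair recursion, for relating A's index loops to structural recursion
def pvPairRecG (F : pvTup → pvTup → PySem.Set Int → PySem.Set Int) : List pvTup → PySem.Set Int → PySem.Set Int
  | [], fs => fs
  | t :: r, fs => pvPairRecG F r (r.foldl (fun fs t2 => F t t2 fs) fs)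

-- updating with `add t x` = adding x after updating with t
theorem pv_update_add (fs t : PySem.Set Int) (x : Int) :
    PySem.Set.update fs (PySem.Set.add t x) = PySem.Set.add (PySem.Set.update fs t) x := by
  by_cases hx : x ∈ t
  · rw [PySem.Set.add_of_mem hx, PySem.Set.add_of_mem (by rw [PySem.Set.mem_update]; exact Or.inr hx)]
  · rw [PySem.Set.add_of_not_mem hx, PySem.Set.update_append, PySem.Set.update_cons, PySem.Set.update_nil]

theorem pv_update_comm_fold {β : Type} (l : List β) (step : PySem.Set Int → β → PySem.Set Int)
    (h : ∀ s b fs, PySem.Set.update fs (step s b) = step (PySem.Set.update fs s) b) :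
    ∀ (t fs : PySem.Set Int), PySem.Set.update fs (l.foldl step t) = l.foldl step (PySem.Set.update fs t) := by
  induction l with
  | nil => intro t fs; simp
  | cons b l ih => intro t fs; simp only [List.foldl_cons]; rw [ih, h]

-- A's per-tuple candidate set, merged into factors, = B's direct adds
theorem pv_gcd_step_eq (t : pvTup) (N : Int) (fs : PySem.Set Int) :
    PySem.Set.update fs (gcd_channels_5tuple t.1 t.2.1 t.2.2.1 t.2.2.2.1 t.2.2.2.2 N) = pvGcdAdd fs t N := by
  unfold gcd_channels_5tuple pvGcdAdd
  rw [pv_update_comm_fold _ _ ?h]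
  case h =>
    intro s b fs'
    dsimp only
    split_ifs <;> simp [pv_update_add]
  simp only [PySem.Set.empty, PySem.Set.update_nil]
  simp only [List.foldl_cons, List.foldl_nil]

-- A's per-pair candidate set, merged into factors, = B's direct adds
theorem pv_cross_step_eq (t1 t2 : pvTup) (N : Int) (fs : PySem.Set Int) :
    PySem.Set.update fs (cross_collision_5tuple t1 t2 N) = pvCrossAdd fs t1 t2 N := by
  unfold cross_collision_5tuple pvCrossAdd
  rw [pv_update_comm_fold _ _ ?h]
  · simp only [PySem.Set.empty, PySem.Set.update_nil]
  case h =>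
    intro s b fs'
    dsimp only
    rw [pv_update_comm_fold _ _ ?h2]
    case h2 =>
      intro s' b' fs''
      dsimp only
      split_ifs <;> simp [pv_update_add]

-- the two nested index loops over a list = structural recursion over unordered pairs
theorem pv_idx_pairs (F : pvTup → pvTup → PySem.Set Int → PySem.Set Int) :
    ∀ (c : List pvTup) (fs : PySem.Set Int),
      (PySem.List.pyRange 0 (PySem.List.len c) 1).foldl (fun fs i =>
        (PySem.List.pyRange (i + 1) (PySem.List.len c) 1).foldl (fun fs j =>
          F (PySem.List.pyGetD c i pvTupD) (PySem.List.pyGetD c j pvTupD) fs) fs) fs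
      = pvPairRecG F c fs := by
  intro c
  induction c with
  | nil => intro fs; simp [PySem.List.pyRange_one_eq_nil, pvPairRecG]
  | cons t r ih =>
    intro fs
    have hlen : PySem.List.len (t :: r) = (r.length : Int) + 1 := by
      simp [PySem.List.len_eq]
    rw [PySem.List.pyRange_one_cons (by rw [hlen]; positivity)]
    simp only [List.foldl_cons]
    have stepA :
        (PySem.List.pyRange (0 + 1) (PySem.List.len (t :: r)) 1).foldl (fun fs j =>
          F (PySem.List.pyGetD (t :: r) 0 pvTupD) (PySem.List.pyGetD (t :: r) j pvTupD) fs) fs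
        = r.foldl (fun fs t2 => F t t2 fs) fs := by
      rw [PySem.List.pyGetD_zero_cons]
      have := PySem.List.foldl_pyRange_pyGetD (xs := t :: r) (a := 1)
        (f := fun acc y => F t y acc) (d := pvTupD) (init := fs) (by norm_num)
      simpa using this
    rw [stepA, show ((0:Int) + 1) = 1 by norm_num]
    have stepB :
        (PySem.List.pyRange 1 (PySem.List.len (t :: r)) 1).foldl (fun fs i =>
          (PySem.List.pyRange (i + 1) (PySem.List.len (t :: r)) 1).foldl (fun fs j =>
            F (PySem.List.pyGetD (t :: r) i pvTupD) (PySem.List.pyGetD (t :: r) j pvTupD) fs) fs)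
          (r.foldl (fun fs t2 => F t t2 fs) fs)
        = (PySem.List.pyRange 0 (PySem.List.len r) 1).foldl (fun fs i =>
          (PySem.List.pyRange (i + 1) (PySem.List.len r) 1).foldl (fun fs j =>
            F (PySem.List.pyGetD r i pvTupD) (PySem.List.pyGetD r j pvTupD) fs) fs)
          (r.foldl (fun fs t2 => F t t2 fs) fs) := by
      rw [PySem.List.pyRange_one (a := 1), PySem.List.pyRange_one (a := 0)]
      have hc : (PySem.List.len (t :: r) - 1).toNat = r.length := by
        rw [hlen]; omega
      have hr : (PySem.List.len r - 0).toNat = r.length := by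
        simp [PySem.List.len_eq]
      rw [hc, hr, List.foldl_map, List.foldl_map]
      apply PySem.List.foldl_congr_mem
      intro acc k hk
      have hk' : (k : Nat) < r.length := List.mem_range.mp hk
      have e1 : PySem.List.pyGetD (t :: r) (1 + (k : Int)) pvTupD
          = PySem.List.pyGetD r ((0 : Int) + (k : Int)) pvTupD := by
        have h1 : (1 + (k : Int)) = ((k + 1 : Nat) : Int) := by push_cast; ring
        have h2 : ((0 : Int) + (k : Int)) = ((k : Nat) : Int) := by omega
        rw [h1, h2, PySem.List.pyGetD_natCast, PySem.List.pyGetD_natCast]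
        simp
      rw [e1]
      have e2 := PySem.List.foldl_pyRange_pyGetD (xs := t :: r) (a := 1 + (k : Int) + 1)
        (f := fun acc y => F (PySem.List.pyGetD r ((0:Int) + (k:Int)) pvTupD) y acc) (d := pvTupD)
        (init := acc) (by positivity)
      have e3 := PySem.List.foldl_pyRange_pyGetD (xs := r) (a := (0 : Int) + (k : Int) + 1)
        (f := fun acc y => F (PySem.List.pyGetD r ((0:Int) + (k:Int)) pvTupD) y acc) (d := pvTupD)
        (init := acc) (by positivity)
      rw [e2, e3]
      have hdrop : ((t :: r).drop (1 + (k:Int) + 1).toNat) = r.drop ((0:Int) + (k:Int) + 1).toNat := by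
        have h3 : (1 + (k:Int) + 1).toNat = ((0:Int) + (k:Int) + 1).toNat + 1 := by omega
        rw [h3, List.drop_succ_cons]
      rw [hdrop]
    rw [stepB, ih]
    rfl

theorem pv_pairRecG_cross (N : Int) :
    ∀ (c : List pvTup) (fs : PySem.Set Int),
      pvPairRecG (fun t1 t2 fs => PySem.Set.update fs (cross_collision_5tuple t1 t2 N)) c fs
      = pvPairRec N c fs := by
  intro c
  induction c with
  | nil => intro fs; rfl
  | cons t r ih =>
    intro fs
    show pvPairRecG _ r _ = pvPairRec N r _
    rw [ih]
    congr 1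
    apply PySem.List.foldl_congr_mem
    intro acc t2 _
    exact pv_cross_step_eq t t2 N acc

-- index-pair loops over one group = structural pair recursion
theorem pv_groupLoop_eq_pairRec (N : Int) (c : List pvTup) (fs : PySem.Set Int) :
    pvGroupLoop N c fs = pvPairRec N c fs := by
  unfold pvGroupLoop
  rw [pv_idx_pairs (F := fun t1 t2 fs => PySem.Set.update fs (cross_collision_5tuple t1 t2 N)) c fs,
    pv_pairRecG_cross]

-- fold of a guard that never fires is the identity
theorem pv_foldl_guard_false {β : Type} (l : List β) (p : β → Bool) (g : PySem.Set Int → β → PySem.Set Int)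
    (h : ∀ b ∈ l, p b = false) (fs : PySem.Set Int) :
    l.foldl (fun fs b => if p b then g fs b else fs) fs = fs := by
  induction l generalizing fs with
  | nil => rfl
  | cons b l ih =>
    simp only [List.foldl_cons, h b List.mem_cons_self, Bool.false_eq_true, if_false]
    exact ih (fun b hb => h b (List.mem_cons_of_mem _ hb)) fs

-- pvCombLoop on a constant-key chunk followed by foreign keys
theorem pv_combLoop_chunk (N k : Int) :
    ∀ (c rest : List pvTup) (fs : PySem.Set Int),
      (∀ u ∈ c, pvKey u = k) → (∀ u ∈ rest, pvKey u ≠ k) →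
      pvCombLoop N (c ++ rest) fs = pvCombLoop N rest (pvPairRec N c fs) := by
  intro c
  induction c with
  | nil => intro rest fs _ _; rfl
  | cons t1 c' ih =>
    intro rest fs hc hr
    show pvCombLoop N (c' ++ rest) _ = pvCombLoop N rest (pvPairRec N c' _)
    simp only [List.append_eq]
    rw [List.foldl_append]
    have hinner : c'.foldl (fun fs t2 => if t1.2.2.2.2 == t2.2.2.2.2 then pvCrossAdd fs t1 t2 N else fs) fs
        = c'.foldl (fun fs t2 => pvCrossAdd fs t1 t2 N) fs := by
      apply PySem.List.foldl_congr_mem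
      intro acc t2 ht2
      have e1 : pvKey t1 = k := hc t1 List.mem_cons_self
      have e2 : pvKey t2 = k := hc t2 (List.mem_cons_of_mem _ ht2)
      have : (t1.2.2.2.2 == t2.2.2.2.2) = true := by
        unfold pvKey at e1 e2; rw [e1, e2]; simp
      rw [this]; rfl
    rw [hinner]
    rw [pv_foldl_guard_false _ (fun t2 => t1.2.2.2.2 == t2.2.2.2.2) (fun fs t2 => pvCrossAdd fs t1 t2 N)
      (by
        intro b hb
        have e1 : pvKey t1 = k := hc t1 List.mem_cons_self
        have e2 : pvKey b ≠ k := hr b hb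
        unfold pvKey at e1 e2
        simp only [beq_eq_false_iff_ne, ne_eq]
        omega)]
    exact ih rest _ (fun u hu => hc u (List.mem_cons_of_mem _ hu)) hr

-- a chunk of equal elements collapses to one element of the set
theorem pv_ofList_const (k : Int) :
    ∀ (l : List Int), l ≠ [] → (∀ x ∈ l, x = k) → PySem.Set.ofList l = [k] := by
  intro l
  induction l with
  | nil => intro h; exact absurd rfl h
  | cons x l ih =>
    intro _ hx
    rw [PySem.Set.ofList_cons, hx x List.mem_cons_self]
    rcases eq_or_ne l [] with rfl | hl
    · rfl
    · rw [ih hl (fun y hy => hx y (List.mem_cons_of_mem _ hy))]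
      simp [PySem.Set.discard]

theorem pv_update_cons_notmem (x : Int) :
    ∀ (l : List Int) (s : PySem.Set Int), x ∉ l →
      PySem.Set.update (x :: s) l = x :: PySem.Set.update s l := by
  intro l
  induction l with
  | nil => intro s _; rfl
  | cons y l ih =>
    intro s hx
    have hyx : y ≠ x := fun h => hx (by simp [h])
    rw [PySem.Set.update_cons, PySem.Set.update_cons]
    have hadd : PySem.Set.add (x :: s) y = x :: PySem.Set.add s y := by
      by_cases hy : y ∈ s
      · rw [PySem.Set.add_of_mem hy, PySem.Set.add_of_mem (by simp [hy])]
      · rw [PySem.Set.add_of_not_mem hy, PySem.Set.add_of_not_mem (by simp [hy, hyx])]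
        rfl
    rw [hadd, ih _ (fun h => hx (List.mem_cons_of_mem _ h))]

-- set of a nonempty constant block followed by foreign elements
theorem pv_ofList_chunk (l1 l2 : List Int) (k : Int) (h0 : l1 ≠ []) (h1 : ∀ x ∈ l1, x = k)
    (h2 : ∀ x ∈ l2, x ≠ k) :
    PySem.Set.ofList (l1 ++ l2) = k :: PySem.Set.ofList l2 := by
  rw [PySem.Set.ofList_append, pv_ofList_const k l1 h0 h1]
  have : ([k] : PySem.Set Int) = k :: ([] : PySem.Set Int) := rfl
  rw [this, pv_update_cons_notmem k l2 [] (fun h => h2 k h rfl)]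
  rfl

-- the A-side phase 2 after the dict has been rewritten to keys/filters
def pvA2 (N : Int) (ts : List pvTup) (fs : PySem.Set Int) : PySem.Set Int :=
  (PySem.Set.ofList (ts.map pvKey)).foldl
    (fun fs k => pvPairRec N (ts.filter (fun t => pvKey t == k)) fs) fs

theorem pv_A2_eq_comb (N : Int) :
    ∀ (n : Nat) (ts : List pvTup), ts.length ≤ n → ((ts.map pvKey).Pairwise (· ≤ ·)) →
      ∀ fs, pvA2 N ts fs = pvCombLoop N ts fs := by
  intro n
  induction n with
  | zero =>
    intro ts hlen _ fs
    have : ts = [] := List.length_eq_zero_iff.mp (Nat.le_zero.mp hlen)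
    subst this
    rfl
  | succ n ihn =>
    intro ts hlen hp fs
    match ts with
    | [] => rfl
    | t :: ts' =>
      have hp' : (t :: ts').Pairwise (fun a b => pvKey a ≤ pvKey b) := List.pairwise_map.mp hp
      have htail : ts'.Pairwise (fun a b => pvKey a ≤ pvKey b) := (List.pairwise_cons.mp hp').2
      set k := pvKey t with hk
      set c' := ts'.takeWhile (fun u => pvKey u == k) with hc'
      set rest := ts'.dropWhile (fun u => pvKey u == k) with hrest
      have hsplit : ts' = c' ++ rest := (List.takeWhile_append_dropWhile).symm
      have hck : ∀ u ∈ c', pvKey u = k := by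
        intro u hu
        have := List.mem_takeWhile_imp hu
        exact beq_iff_eq.mp this
      have hrk : ∀ u ∈ rest, k < pvKey u := by
        cases hre : rest with
        | nil => intro u hu; exact absurd hu (List.not_mem_nil)
        | cons h rest' =>
          have hdw : ts'.dropWhile (fun u => pvKey u == k) = h :: rest' := hrest.symm.trans hre
          have hhne : pvKey h ≠ k := by
            have hne : ts'.dropWhile (fun u => pvKey u == k) ≠ [] := by rw [hdw]; simp
            have hfalse := List.head_dropWhile_not (fun u => pvKey u == k) hne
            have hhd : (ts'.dropWhile (fun u => pvKey u == k)).head hne = h := by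
              simp [hdw]
            rw [hhd] at hfalse
            simpa using hfalse
          have hhmem : h ∈ ts' := by
            have hmem : h ∈ ts'.dropWhile (fun u => pvKey u == k) := by
              rw [hdw]; exact List.mem_cons_self
            exact (List.dropWhile_sublist _).mem hmem
          have hkh : k < pvKey h := lt_of_le_of_ne (List.rel_of_pairwise_cons hp' hhmem) (Ne.symm hhne)
          have hrpw : (h :: rest').Pairwise (fun a b => pvKey a ≤ pvKey b) := by
            have := htail.sublist (List.dropWhile_sublist (fun u => pvKey u == k))
            rw [hdw] at this; exact this
          obtain ⟨hh2, _⟩ := List.pairwise_cons.mp hrpw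
          intro u hu
          rcases List.mem_cons.mp hu with rfl | hu'
          · exact hkh
          · exact lt_of_lt_of_le hkh (hh2 u hu')
      have hrkne : ∀ u ∈ rest, pvKey u ≠ k := fun u hu => ne_of_gt (hrk u hu)
      -- keys set
      have hkeys : PySem.Set.ofList ((t :: ts').map pvKey) = k :: PySem.Set.ofList (rest.map pvKey) := by
        have : (t :: ts').map pvKey = ((t :: c').map pvKey) ++ (rest.map pvKey) := by
          rw [show (t :: ts') = (t :: c') ++ rest by rw [List.cons_append, ← hsplit]]
          rw [List.map_append]
        rw [this]
        apply pv_ofList_chunk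
        · simp
        · intro x hx
          rcases List.mem_map.mp hx with ⟨u, hu, rfl⟩
          rcases List.mem_cons.mp hu with rfl | hu'
          · rfl
          · exact hck u hu'
        · intro x hx
          rcases List.mem_map.mp hx with ⟨u, hu, rfl⟩
          exact hrkne u hu
      -- the group for key k
      have hfilt1 : (t :: ts').filter (fun u => pvKey u == k) = t :: c' := by
        rw [List.filter_cons_of_pos (by simp [hk]), hsplit, List.filter_append]
        rw [List.filter_eq_self.mpr (fun u hu => beq_iff_eq.mpr (hck u hu)),
          List.filter_eq_nil_iff.mpr (fun u hu => by simp [hrkne u hu]), List.append_nil]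
      -- groups for the remaining keys come from rest alone
      have hfilt2 : ∀ k' ∈ PySem.Set.ofList (rest.map pvKey),
          (t :: ts').filter (fun u => pvKey u == k') = rest.filter (fun u => pvKey u == k') := by
        intro k' hk'
        have hk'mem : k' ∈ rest.map pvKey := (PySem.List.mem_dedup _ _).mp hk'
        rcases List.mem_map.mp hk'mem with ⟨w, hw, rfl⟩
        have hkk' : k < pvKey w := hrk w hw
        rw [List.filter_cons_of_neg (by simp; omega), hsplit, List.filter_append,
          List.filter_eq_nil_iff.mpr (fun u hu => by
            have := hck u hu; simp; omega), List.nil_append]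
      -- compute
      unfold pvA2
      rw [hkeys]
      simp only [List.foldl_cons]
      rw [hfilt1]
      have hcongr : (PySem.Set.ofList (rest.map pvKey)).foldl
            (fun fs k' => pvPairRec N ((t :: ts').filter (fun u => pvKey u == k')) fs)
            (pvPairRec N (t :: c') fs)
          = (PySem.Set.ofList (rest.map pvKey)).foldl
            (fun fs k' => pvPairRec N (rest.filter (fun u => pvKey u == k')) fs)
            (pvPairRec N (t :: c') fs) := by
        apply PySem.List.foldl_congr_mem
        intro acc k' hk'
        rw [hfilt2 k' hk']
      rw [hcongr]
      have hlen' : rest.length ≤ n := by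
        have h1 : rest.length ≤ ts'.length := by
          rw [hrest]; exact List.length_dropWhile_le _ _
        have h2 : (t :: ts').length = ts'.length + 1 := List.length_cons
        omega
      have hpw' : (rest.map pvKey).Pairwise (· ≤ ·) := by
        apply List.pairwise_map.mpr
        exact htail.sublist (List.dropWhile_sublist _)
      have := ihn rest hlen' hpw' (pvPairRec N (t :: c') fs)
      rw [show ((PySem.Set.ofList (rest.map pvKey)).foldl
            (fun fs k' => pvPairRec N (rest.filter (fun u => pvKey u == k')) fs)
            (pvPairRec N (t :: c') fs)) = pvA2 N rest (pvPairRec N (t :: c') fs) from rfl, this]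
      rw [show (t :: ts') = (t :: c') ++ rest by rw [List.cons_append, ← hsplit]]
      have hcall : ∀ u ∈ t :: c', pvKey u = k := by
        intro u hu
        rcases List.mem_cons.mp hu with rfl | hu'
        · exact hk.symm
        · exact hck u hu'
      rw [pv_combLoop_chunk N k (t :: c') rest fs hcall hrkne]

-- every tuple appended by the a3-loop has hypotenuse d
theorem pv_findA3_ext (d2 a1 a2 d : Int) :
    ∀ (l : List Int) (acc : List pvTup), ∃ new, pvFindA3 d2 a1 a2 d l acc = acc ++ new ∧
      ∀ u ∈ new, pvKey u = d := by
  intro l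
  induction l with
  | nil => intro acc; exact ⟨[], by simp [pvFindA3]⟩
  | cons a3 l ih =>
    intro acc
    unfold pvFindA3
    dsimp only
    split_ifs with h1 h2
    · exact ⟨[], by simp⟩
    · obtain ⟨new, e, hn⟩ := ih (acc ++ [(a1, a2, a3, pvIsqrt (d2 - a1*a1 - a2*a2 - a3*a3), d)])
      refine ⟨(a1, a2, a3, pvIsqrt (d2 - a1*a1 - a2*a2 - a3*a3), d) :: new, ?_, ?_⟩
      · rw [e]; simp
      · intro u hu
        rcases List.mem_cons.mp hu with rfl | hu'
        · rfl
        · exact hn u hu'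
    · obtain ⟨new, e, hn⟩ := ih acc
      exact ⟨new, e, hn⟩

-- a fold whose every step appends tuples of hypotenuse d appends tuples of hypotenuse d
theorem pv_foldl_keyd {β : Type} (d : Int) (g : List pvTup → β → List pvTup)
    (hg : ∀ acc x, ∃ new, g acc x = acc ++ new ∧ ∀ u ∈ new, pvKey u = d) :
    ∀ (l : List β) (acc : List pvTup), ∃ new, l.foldl g acc = acc ++ new ∧ ∀ u ∈ new, pvKey u = d := by
  intro l
  induction l with
  | nil => intro acc; exact ⟨[], by simp⟩
  | cons x l ih =>
    intro acc
    obtain ⟨n1, e1, h1⟩ := hg acc x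
    obtain ⟨n2, e2, h2⟩ := ih (acc ++ n1)
    refine ⟨n1 ++ n2, ?_, ?_⟩
    · simp only [List.foldl_cons, e1, e2, List.append_assoc]
    · intro u hu
      rcases List.mem_append.mp hu with h | h
      · exact h1 u h
      · exact h2 u h

-- one outer iteration (one value of d) appends only tuples of hypotenuse d
theorem pv_outer_ext (d : Int) (acc : List pvTup) :
    ∃ new, (let d2 := d * d
      (PySem.List.pyRange 0 d 1).foldl (fun acc a1 =>
        (PySem.List.pyRange a1 d 1).foldl (fun acc a2 =>
          pvFindA3 d2 a1 a2 d (PySem.List.pyRange a2 d 1) acc) acc) acc) = acc ++ new ∧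
      ∀ u ∈ new, pvKey u = d := by
  apply pv_foldl_keyd
  intro acc a1
  apply pv_foldl_keyd
  intro acc a2
  exact pv_findA3_ext _ _ _ _ _ _

theorem pv_outer_sorted :
    ∀ (R : List Int) (acc : List pvTup),
      ((acc.map pvKey).Pairwise (· ≤ ·)) → (∀ u ∈ acc, ∀ e ∈ R, pvKey u ≤ e) →
      R.Pairwise (· ≤ ·) →
      (((R.foldl (fun acc d =>
          let d2 := d * d
          (PySem.List.pyRange 0 d 1).foldl (fun acc a1 =>
            (PySem.List.pyRange a1 d 1).foldl (fun acc a2 =>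
              pvFindA3 d2 a1 a2 d (PySem.List.pyRange a2 d 1) acc) acc) acc) acc).map pvKey).Pairwise (· ≤ ·)) := by
  intro R
  induction R with
  | nil => intro acc h _ _; exact h
  | cons d R' ih =>
    intro acc hacc hbound hR
    obtain ⟨hd, hR'⟩ := List.pairwise_cons.mp hR
    obtain ⟨new, e, hnew⟩ := pv_outer_ext d acc
    simp only [List.foldl_cons]
    rw [e]
    apply ih
    · rw [List.map_append]
      apply List.pairwise_append.mpr
      refine ⟨hacc, ?_, ?_⟩
      · apply List.pairwise_of_forall_mem_list
        intro a ha b hb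
        rcases List.mem_map.mp ha with ⟨u, hu, rfl⟩
        rcases List.mem_map.mp hb with ⟨v, hv, rfl⟩
        rw [hnew u hu, hnew v hv]
      · intro a ha b hb
        rcases List.mem_map.mp ha with ⟨u, hu, rfl⟩
        rcases List.mem_map.mp hb with ⟨v, hv, rfl⟩
        rw [hnew v hv]
        exact hbound u hu d List.mem_cons_self
    · intro u hu e' he'
      rcases List.mem_append.mp hu with h | h
      · exact hbound u h e' (List.mem_cons_of_mem _ he')
      · rw [hnew u h]; exact hd e' he'
    · exact hR'

-- keys of find_5tuples are nondecreasing (tuples are generated in increasing hypotenuse order)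
theorem pv_find5_sorted (d_max : Int) :
    ((pvFind5 d_max).map pvKey).Pairwise (· ≤ ·) := by
  unfold pvFind5
  apply pv_outer_sorted
  · simp
  · simp
  · exact (PySem.List.pairwise_lt_pyRange_one 1 (d_max + 1)).imp le_of_lt

-- the by_hyp dictionary of A, rewritten to keys and filters
theorem pv_dict_items (ts : List pvTup) :
    (ts.foldl (fun (d : PySem.Dict Int (List pvTup)) t => d.modify t.2.2.2.2 [] (· ++ [t])) PySem.Dict.empty).items
      = (PySem.Set.ofList (ts.map pvKey)).map (fun k => (k, ts.filter (fun t => pvKey t == k))) := by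
  have hpair : ts.foldl (fun (d : PySem.Dict Int (List pvTup)) t => d.modify t.2.2.2.2 [] (· ++ [t])) PySem.Dict.empty
      = (ts.map (fun t => (pvKey t, t))).foldl
          (fun (d : PySem.Dict Int (List pvTup)) p => d.modify p.1 [] (· ++ [p.2])) PySem.Dict.empty := by
    rw [List.foldl_map]
    rfl
  rw [hpair]
  have hnd : ((ts.map (fun t => (pvKey t, t))).foldl
      (fun (d : PySem.Dict Int (List pvTup)) p => d.modify p.1 [] (· ++ [p.2])) PySem.Dict.empty).keys.Nodup := by
    apply PySem.Dict.nodup_keys_foldl_modify_key (key := Prod.fst) (d0 := []) (f := fun _ p => (· ++ [p.2]))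
    simp [PySem.Dict.keys_empty]
  rw [PySem.Dict.items_eq_map_keys _ hnd []]
  have hkeys : ((ts.map (fun t => (pvKey t, t))).foldl
      (fun (d : PySem.Dict Int (List pvTup)) p => d.modify p.1 [] (· ++ [p.2])) PySem.Dict.empty).keys
      = PySem.Set.ofList (ts.map pvKey) := by
    rw [PySem.Dict.keys_foldl_modify_key (key := Prod.fst) (d0 := []) (f := fun _ p => (· ++ [p.2]))]
    rw [List.map_map]
    have hcomp : (Prod.fst ∘ fun t : pvTup => (pvKey t, t)) = pvKey := rfl
    rw [hcomp]
    simp [PySem.Dict.keys_empty, PySem.Set.update_nil_left]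
  rw [hkeys]
  apply List.map_congr_left
  intro k hk
  rw [PySem.Dict.getD_foldl_modify_append]
  rw [PySem.Dict.getD_empty, List.nil_append]
  congr 1
  rw [List.filter_map, List.map_map]
  simp [Function.comp_def]

-- ===== VERDICT (by name: the statement is the Claim_ definition above) =====
theorem factor_via_5tuples_spec : Claim_equal_factor_via_5tuples := by
  intro N d_max _
  unfold Spec_factor_via_5tuples factor_via_5tuples factor_via_5tuples_alt
  dsimp only
  have hsplit : (pvFind5 d_max).foldl
      (fun (st : PySem.Dict Int (List pvTup) × PySem.Set Int) t =>
        (st.1.modify t.2.2.2.2 [] (· ++ [t]),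
         PySem.Set.update st.2 (gcd_channels_5tuple t.1 t.2.1 t.2.2.1 t.2.2.2.1 t.2.2.2.2 N)))
      (PySem.Dict.empty, PySem.Set.empty)
      = ((pvFind5 d_max).foldl (fun (d : PySem.Dict Int (List pvTup)) t => d.modify t.2.2.2.2 [] (· ++ [t])) PySem.Dict.empty,
         (pvFind5 d_max).foldl (fun (s : PySem.Set Int) t =>
           PySem.Set.update s (gcd_channels_5tuple t.1 t.2.1 t.2.2.1 t.2.2.2.1 t.2.2.2.2 N)) PySem.Set.empty) :=
    PySem.List.foldl_prod_mk
      (f := fun (d : PySem.Dict Int (List pvTup)) (t : pvTup) => d.modify t.2.2.2.2 [] (· ++ [t]))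
      (g := fun (s : PySem.Set Int) (t : pvTup) =>
        PySem.Set.update s (gcd_channels_5tuple t.1 t.2.1 t.2.2.1 t.2.2.2.1 t.2.2.2.2 N))
      (l := pvFind5 d_max) (a := PySem.Dict.empty) (b := PySem.Set.empty)
  rw [hsplit]
  dsimp only
  congr 1
  rw [pv_dict_items, List.foldl_map]
  have h1 : (pvFind5 d_max).foldl (fun (s : PySem.Set Int) t =>
      PySem.Set.update s (gcd_channels_5tuple t.1 t.2.1 t.2.2.1 t.2.2.2.1 t.2.2.2.2 N)) PySem.Set.empty
      = (pvFind5 d_max).foldl (fun fs t => pvGcdAdd fs t N) PySem.Set.empty := by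
    apply PySem.List.foldl_congr_mem
    intro acc t _
    exact pv_gcd_step_eq t N acc
  rw [h1]
  have h2 : (PySem.Set.ofList ((pvFind5 d_max).map pvKey)).foldl
      (fun fs k => pvGroupLoop N ((k, (pvFind5 d_max).filter (fun t => pvKey t == k)).2) fs)
      ((pvFind5 d_max).foldl (fun fs t => pvGcdAdd fs t N) PySem.Set.empty)
      = pvA2 N (pvFind5 d_max) ((pvFind5 d_max).foldl (fun fs t => pvGcdAdd fs t N) PySem.Set.empty) := by
    unfold pvA2
    apply PySem.List.foldl_congr_mem
    intro acc k _
    exact pv_groupLoop_eq_pairRec N _ acc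
  rw [h2]
  rw [pv_A2_eq_comb N (pvFind5 d_max).length (pvFind5 d_max) le_rfl (pv_find5_sorted d_max)]
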